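-- pv_equiv track=rewrite | github.com/kennykguo/sentiment-analyzer-app | app/backend/modules/pos_tagging.py | top_pos_tags
-- ===== SOURCE A (Python) =====
-- from collections import Counter
--
-- def top_pos_tags(tags, top_n=20):
--     nouns = [word.lower() for word, pos in tags if pos == 'NOUN']
--     verbs = [word.lower() for word, pos in tags if pos == 'VERB']
--     adjectives = [word.lower() for word, pos in tags if pos == 'ADJ']
--
--     return {
--         'nouns': Counter(nouns).most_common(top_n),
--         'verbs': Counter(verbs).most_common(top_n),
--         'adjectives': Counter(adjectives).most_common(top_n)
--     }
-- ===== SOURCE B (Python) =====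
-- def top_pos_tags(tags, top_n=20):
--     # One pass: group-by-POS count tables built incrementally, then rank each table.
--     nouns, verbs, adjs = {}, {}, {}
--     for word, pos in tags:
--         if pos == 'NOUN':
--             w = word.lower(); nouns[w] = nouns.get(w, 0) + 1
--         elif pos == 'VERB':
--             w = word.lower(); verbs[w] = verbs.get(w, 0) + 1
--         elif pos == 'ADJ':
--             w = word.lower(); adjs[w] = adjs.get(w, 0) + 1
--     k = max(top_n, 0)
--     def top(counts):
--         return sorted(counts.items(), key=lambda kv: kv[1], reverse=True)[:k]
--     return {'nouns': top(nouns), 'verbs': top(verbs), 'adjectives': top(adjs)}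
-- ===== Notes on version B (the rewrite author's own statement) =====
-- stated objective: alternative
-- what changed: B replaces A's three separate filter-and-lower list comprehensions plus Counter constructions by a single pass over tags that builds one count table per POS category incrementally, then ranks each table with a stable descending sort and a slice.
import Mathlib
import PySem

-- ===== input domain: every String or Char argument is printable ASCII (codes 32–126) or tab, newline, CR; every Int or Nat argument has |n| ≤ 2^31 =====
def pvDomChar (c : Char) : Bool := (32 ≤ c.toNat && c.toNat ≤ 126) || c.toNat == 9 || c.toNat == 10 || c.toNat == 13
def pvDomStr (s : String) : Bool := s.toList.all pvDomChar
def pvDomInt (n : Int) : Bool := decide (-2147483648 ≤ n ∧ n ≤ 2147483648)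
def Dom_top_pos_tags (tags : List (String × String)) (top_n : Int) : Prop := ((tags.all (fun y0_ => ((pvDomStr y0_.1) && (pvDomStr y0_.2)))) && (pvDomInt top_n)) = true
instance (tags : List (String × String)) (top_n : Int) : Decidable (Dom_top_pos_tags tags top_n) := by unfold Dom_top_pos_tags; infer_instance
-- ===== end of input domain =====

-- B replaces A's three filtering scans by one pass that fills a count table per POS category
-- and ranks each table afterwards (alternative decomposition, same return value).

-- ===== PORT A =====
-- Counter(xs).most_common(n) = heapq.nlargest(n, items, key=count) = stable sort by count
-- descending, first n items (n < 0 yields []): exact as sorted(..., reverse=True) + take.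
def aMostCommon (c : PySem.Dict String Int) (n : Int) : List (String × Int) :=
  (PySem.List.sorted c.items (fun p => p.2) true).take n.toNat

def top_pos_tags (tags : List (String × String)) (top_n : Int) : List (String × List (String × Int)) :=
  let nouns := (tags.filter (fun t => t.2 == "NOUN")).map (fun t => PySem.Str.lower t.1)
  let verbs := (tags.filter (fun t => t.2 == "VERB")).map (fun t => PySem.Str.lower t.1)
  let adjectives := (tags.filter (fun t => t.2 == "ADJ")).map (fun t => PySem.Str.lower t.1)
  [("nouns", aMostCommon (PySem.Dict.counter nouns) top_n),
   ("verbs", aMostCommon (PySem.Dict.counter verbs) top_n),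
   ("adjectives", aMostCommon (PySem.Dict.counter adjectives) top_n)]

-- ===== PORT B =====
-- counts[w] = counts.get(w, 0) + 1
def bBump (d : PySem.Dict String Int) (w : String) : PySem.Dict String Int :=
  d.insert w (d.getD w 0 + 1)

-- sorted(counts.items(), key=lambda kv: kv[1], reverse=True)[:k]
def bTop (counts : PySem.Dict String Int) (k : Int) : List (String × Int) :=
  PySem.List.slice (PySem.List.sorted counts.items (fun kv => kv.2) true) none (some k)

def top_pos_tags_alt (tags : List (String × String)) (top_n : Int) : List (String × List (String × Int)) :=
  let st := tags.foldl (fun (st : PySem.Dict String Int × PySem.Dict String Int × PySem.Dict String Int) t =>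
      if t.2 == "NOUN" then (bBump st.1 (PySem.Str.lower t.1), st.2.1, st.2.2)
      else if t.2 == "VERB" then (st.1, bBump st.2.1 (PySem.Str.lower t.1), st.2.2)
      else if t.2 == "ADJ" then (st.1, st.2.1, bBump st.2.2 (PySem.Str.lower t.1))
      else st)
    (PySem.Dict.empty, PySem.Dict.empty, PySem.Dict.empty)
  let k := max top_n 0
  [("nouns", bTop st.1 k), ("verbs", bTop st.2.1 k), ("adjectives", bTop st.2.2 k)]

-- ===== PRECONDITION & SPEC =====
def Spec_top_pos_tags (tags : List (String × String)) (top_n : Int) (out : List (String × List (String × Int))) : Prop := out = top_pos_tags_alt tags top_n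
instance (tags : List (String × String)) (top_n : Int) (out : List (String × List (String × Int))) : Decidable (Spec_top_pos_tags tags top_n out) := by unfold Spec_top_pos_tags; infer_instance

-- ===== CLAIM (what is proved, stated in full; the proofs are below) =====
def Claim_equal_top_pos_tags : Prop := ∀ (tags : List (String × String)) (top_n : Int), Dom_top_pos_tags tags top_n → Spec_top_pos_tags tags top_n (top_pos_tags tags top_n)

-- ===== LEMMAS AND PROOFS =====

-- B's single pass splits into the three per-category counting folds.
theorem bLoop_eq (tags : List (String × String))
    (dn dv da : PySem.Dict String Int) :
    tags.foldl (fun (st : PySem.Dict String Int × PySem.Dict String Int × PySem.Dict String Int) t =>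
      if t.2 == "NOUN" then (bBump st.1 (PySem.Str.lower t.1), st.2.1, st.2.2)
      else if t.2 == "VERB" then (st.1, bBump st.2.1 (PySem.Str.lower t.1), st.2.2)
      else if t.2 == "ADJ" then (st.1, st.2.1, bBump st.2.2 (PySem.Str.lower t.1))
      else st) (dn, dv, da)
    = (((tags.filter (fun t => t.2 == "NOUN")).map (fun t => PySem.Str.lower t.1)).foldl bBump dn,
       ((tags.filter (fun t => t.2 == "VERB")).map (fun t => PySem.Str.lower t.1)).foldl bBump dv,
       ((tags.filter (fun t => t.2 == "ADJ")).map (fun t => PySem.Str.lower t.1)).foldl bBump da) := by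
  induction tags generalizing dn dv da with
  | nil => rfl
  | cons t ts ih =>
    rw [List.foldl_cons, List.filter_cons, List.filter_cons, List.filter_cons]
    by_cases h1 : t.2 == "NOUN"
    · simp only [h1, if_pos, List.map_cons, List.foldl_cons]
      have e : t.2 = "NOUN" := by simpa using h1
      rw [if_neg (by rw [e]; decide), if_neg (by rw [e]; decide)]
      exact ih _ _ _
    · by_cases h2 : t.2 == "VERB"
      · simp only [h1, h2, if_pos, if_neg, Bool.false_eq_true, not_false_eq_true,
          List.map_cons, List.foldl_cons]
        have e : t.2 = "VERB" := by simpa using h2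
        rw [if_neg (by rw [e]; decide)]
        exact ih _ _ _
      · by_cases h3 : t.2 == "ADJ"
        · simp only [h1, h2, h3, if_pos, if_neg, Bool.false_eq_true, not_false_eq_true,
            List.map_cons, List.foldl_cons]
          exact ih _ _ _
        · simp only [h1, h2, h3, if_neg, Bool.false_eq_true, not_false_eq_true]
          exact ih _ _ _

theorem bTop_eq_aMostCommon (d : PySem.Dict String Int) (n : Int) :
    bTop d (max n 0) = aMostCommon d n := by
  unfold bTop aMostCommon
  rw [PySem.List.slice_to _ (by omega : (0:Int) ≤ max n 0)]
  congr 1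
  omega

theorem foldl_bBump_counter (ws : List String) :
    ws.foldl bBump PySem.Dict.empty = PySem.Dict.counter ws := by
  have := PySem.Dict.foldl_insert_getD_add_one_eq_counter (κ := String) ws
  simpa [bBump] using this

-- ===== VERDICT (by name: the statement is the Claim_ definition above) =====
theorem top_pos_tags_spec : Claim_equal_top_pos_tags := by
  intro tags top_n _
  unfold Spec_top_pos_tags top_pos_tags top_pos_tags_alt
  rw [bLoop_eq]
  simp only [foldl_bBump_counter, bTop_eq_aMostCommon]
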